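-- pv_equiv track=rewrite | github.com/nikitasadok/aoc-solutions | aoc7.py | trim_pref
-- ===== SOURCE A (Python) =====
-- def trim_pref(st):
--     stCopy = st
--     trimmed = ""
--     for i in range(len(st)):
--         if (st[i].isnumeric()):
--             trimmed += st[i]
--             stCopy = st[i + 1:]
--
--     return stCopy, trimmed
-- ===== SOURCE B (Python) =====
-- def trim_pref(st):
--     digits = []
--     tail = []
--     found = False
--     for c in reversed(st):
--         if c.isnumeric():
--             found = True
--             digits.append(c)
--         elif not found:
--             tail.append(c)
--     return "".join(reversed(tail)), "".join(reversed(digits))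
-- ===== Notes on version B (the rewrite author's own statement) =====
-- stated objective: alternative
-- what changed: B traverses the string once in reverse, collecting digits and the trailing non-digit run until the first digit seen from the right, so no slicing or index arithmetic is needed, whereas A walks forward by index and re-slices the suffix at every digit.
import Mathlib
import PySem

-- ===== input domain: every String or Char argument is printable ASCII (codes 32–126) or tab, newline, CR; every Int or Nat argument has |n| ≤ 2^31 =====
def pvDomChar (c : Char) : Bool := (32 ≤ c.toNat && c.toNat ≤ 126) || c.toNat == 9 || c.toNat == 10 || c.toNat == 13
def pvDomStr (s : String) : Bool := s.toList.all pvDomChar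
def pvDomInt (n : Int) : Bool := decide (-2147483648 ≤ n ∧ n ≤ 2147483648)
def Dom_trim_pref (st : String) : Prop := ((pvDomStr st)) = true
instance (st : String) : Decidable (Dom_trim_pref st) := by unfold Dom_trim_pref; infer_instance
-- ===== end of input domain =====

-- B is a single reverse traversal collecting the digits and the trailing non-digit run,
-- with no index arithmetic or slicing; objective: alternative.
-- isnumeric is ported as PySem.Chars.isdigit: exact on the ASCII domain Dom_trim_pref.

-- ===== PORT A =====
def trim_pref (st : String) : String × String :=
  let cs := st.toList
  let r := (PySem.List.pyRange 0 cs.length 1).foldl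
    (fun (acc : List Char × List Char) i =>
      if PySem.Chars.isdigit (PySem.List.pyGetD cs i ' ')
      then (PySem.List.slice cs (some (i + 1)) none,
            acc.2 ++ [PySem.List.pyGetD cs i ' '])
      else acc)
    (cs, [])
  (String.ofList r.1, String.ofList r.2)

-- ===== PORT B =====
def trim_pref_alt (st : String) : String × String :=
  let r := st.toList.reverse.foldl
    (fun (acc : List Char × List Char × Bool) c =>
      if PySem.Chars.isdigit c then (acc.1 ++ [c], acc.2.1, true)
      else if acc.2.2 = false then (acc.1, acc.2.1 ++ [c], acc.2.2)
      else acc)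
    ([], [], false)
  (String.ofList r.2.1.reverse, String.ofList r.1.reverse)

-- ===== PRECONDITION & SPEC =====
def Spec_trim_pref (st : String) (out : String × String) : Prop := out = trim_pref_alt st
instance (st : String) (out : String × String) : Decidable (Spec_trim_pref st out) := by unfold Spec_trim_pref; infer_instance

-- ===== CLAIM (what is proved, stated in full; the proofs are below) =====
def Claim_equal_trim_pref : Prop := ∀ (st : String), Dom_trim_pref st → Spec_trim_pref st (trim_pref st)

-- ===== LEMMAS AND PROOFS =====

-- A's loop body, seen over (index, char) pairs.
def pvStepA (cs : List Char) (acc : List Char × List Char) (p : Int × Char) : List Char × List Char :=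
  if PySem.Chars.isdigit p.2
  then (PySem.List.slice cs (some (p.1 + 1)) none, acc.2 ++ [p.2])
  else acc

-- B's loop body.
def pvStepB (acc : List Char × List Char × Bool) (c : Char) : List Char × List Char × Bool :=
  if PySem.Chars.isdigit c then (acc.1 ++ [c], acc.2.1, true)
  else if acc.2.2 = false then (acc.1, acc.2.1 ++ [c], acc.2.2)
  else acc

-- Invariant of A's fold over the enumerate pairs.
theorem pvFoldA_eq (cs : List Char) (l : List (Int × Char)) :
    ∀ (acc : List Char × List Char),
      l.foldl (pvStepA cs) acc =
        ((match (l.filter (fun p => PySem.Chars.isdigit p.2)).getLast? with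
          | none => acc.1
          | some p => PySem.List.slice cs (some (p.1 + 1)) none),
         acc.2 ++ (l.filter (fun p => PySem.Chars.isdigit p.2)).map (·.2)) := by
  induction l with
  | nil => intro acc; simp
  | cons hd tl ih =>
    intro acc
    by_cases hq : PySem.Chars.isdigit hd.2 = true
    · have hstep : pvStepA cs acc hd =
          (PySem.List.slice cs (some (hd.1 + 1)) none, acc.2 ++ [hd.2]) := by
        simp [pvStepA, hq]
      simp only [List.foldl_cons, List.filter_cons, hq, if_pos, hstep, ih]
      rcases h : (tl.filter (fun p => PySem.Chars.isdigit p.2)).getLast? with _ | p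
      · have htl : tl.filter (fun p => PySem.Chars.isdigit p.2) = [] :=
          List.getLast?_eq_none_iff.mp h
        simp [htl]
      · rw [List.getLast?_cons, h]
        simp
    · simp only [List.foldl_cons, List.filter_cons, hq]
      rw [ih]
      simp [pvStepA, hq]

-- Once a digit has been seen, B's fold only keeps appending digits.
theorem pvFoldB_found (l : List Char) :
    ∀ (d t : List Char), l.foldl pvStepB (d, t, true) =
      (d ++ l.filter (fun c => PySem.Chars.isdigit c), t, true) := by
  induction l with
  | nil => intro d t; simp
  | cons hd tl ih =>
    intro d t
    by_cases hq : PySem.Chars.isdigit hd = true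
    · simp [pvStepB, hq, ih]
    · simp [pvStepB, hq, ih]

-- Full characterisation of B's fold from the not-yet-found state.
theorem pvFoldB_eq (l : List Char) :
    ∀ (d t : List Char), l.foldl pvStepB (d, t, false) =
      (d ++ l.filter (fun c => PySem.Chars.isdigit c),
       t ++ l.takeWhile (fun c => !PySem.Chars.isdigit c),
       l.any (fun c => PySem.Chars.isdigit c)) := by
  induction l with
  | nil => intro d t; simp
  | cons hd tl ih =>
    intro d t
    by_cases hq : PySem.Chars.isdigit hd = true
    · simp [pvStepB, hq, pvFoldB_found, List.any_cons]
    · simp [pvStepB, hq, ih, List.any_cons]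

-- The suffix after the last digit, computed via the last filtered enumerate pair,
-- equals the reversed trailing non-digit run.
theorem pvSuffix_eq (cs : List Char) :
    (match ((PySem.List.enumerate cs 0).filter (fun p => PySem.Chars.isdigit p.2)).getLast? with
     | none => cs
     | some p => PySem.List.slice cs (some (p.1 + 1)) none)
    = (cs.reverse.takeWhile (fun c => !PySem.Chars.isdigit c)).reverse := by
  induction cs using List.reverseRecOn with
  | nil => simp
  | append_singleton ys c ih =>
    rw [PySem.List.enumerate_append]
    by_cases hq : PySem.Chars.isdigit c = true
    · have hfin : ((PySem.List.enumerate ys 0 ++ PySem.List.enumerate [c] (0 + ys.length)).filter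
          (fun p => PySem.Chars.isdigit p.2)).getLast?
          = some ((0 + (ys.length : Int)), c) := by
        simp [PySem.List.enumerate, List.filter_append, hq]
      rw [hfin]
      show PySem.List.slice (ys ++ [c]) (some (0 + (ys.length : Int) + 1)) none
          = (List.takeWhile (fun c => !PySem.Chars.isdigit c) (ys ++ [c]).reverse).reverse
      rw [PySem.List.slice_from _ (by positivity)]
      have hL : ((0 : Int) + (ys.length : Int) + 1).toNat = (ys ++ [c]).length := by
        simp
      rw [hL, List.drop_length]
      simp [hq]
    · have hfilc : (PySem.List.enumerate [c] ((0 : Int) + ys.length)).filter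
          (fun p => PySem.Chars.isdigit p.2) = [] := by
        simp [PySem.List.enumerate, hq]
      rw [List.filter_append, hfilc, List.append_nil]
      have htail : (ys ++ [c]).reverse.takeWhile (fun c => !PySem.Chars.isdigit c)
          = c :: ys.reverse.takeWhile (fun c => !PySem.Chars.isdigit c) := by
        simp [hq]
      rw [htail]
      rcases h : ((PySem.List.enumerate ys 0).filter (fun p => PySem.Chars.isdigit p.2)).getLast? with _ | p
      · simp only [h] at ih
        simp only [h]
        rw [List.reverse_cons, ← ih]
      · simp only [h] at ih
        simp only [h]
        have hpmem : p ∈ (PySem.List.enumerate ys 0).filter (fun q => PySem.Chars.isdigit q.2) :=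
          List.mem_of_getLast? h
        have hpmem2 : p ∈ PySem.List.enumerate ys 0 := (List.mem_filter.mp hpmem).1
        obtain ⟨k, hk, hpk⟩ := (PySem.List.mem_enumerate_iff _ _ _).mp hpmem2
        have hp1 : p.1 = (k : Int) := by rw [hpk]; simp
        have hle : (0 : Int) ≤ p.1 + 1 := by rw [hp1]; positivity
        rw [PySem.List.slice_from _ hle]
        rw [PySem.List.slice_from _ hle] at ih
        have hklen : (p.1 + 1).toNat ≤ ys.length := by rw [hp1]; omega
        rw [List.drop_append_of_le_length hklen, List.reverse_cons, ← ih]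

theorem trim_pref_eq_alt (st : String) : trim_pref st = trim_pref_alt st := by
  unfold trim_pref trim_pref_alt
  have he := PySem.List.enumerate_eq_map_pyRange st.toList ' '
  have hfold :
      (PySem.List.pyRange 0 (st.toList.length) 1).foldl
        (fun (acc : List Char × List Char) i =>
          if PySem.Chars.isdigit (PySem.List.pyGetD st.toList i ' ')
          then (PySem.List.slice st.toList (some (i + 1)) none,
                acc.2 ++ [PySem.List.pyGetD st.toList i ' '])
          else acc)
        (st.toList, []) =
      (PySem.List.enumerate st.toList 0).foldl (pvStepA st.toList) (st.toList, []) := by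
    rw [he, List.foldl_map]
    rfl
  simp only []
  rw [hfold, pvFoldA_eq]
  have hB : st.toList.reverse.foldl
      (fun (acc : List Char × List Char × Bool) c =>
        if PySem.Chars.isdigit c then (acc.1 ++ [c], acc.2.1, true)
        else if acc.2.2 = false then (acc.1, acc.2.1 ++ [c], acc.2.2)
        else acc)
      ([], [], false)
      = st.toList.reverse.foldl pvStepB ([], [], false) := rfl
  rw [hB, pvFoldB_eq]
  simp only [List.nil_append]
  rw [pvSuffix_eq]
  have hfil : (st.toList.reverse.filter (fun c => PySem.Chars.isdigit c)).reverse
      = ((PySem.List.enumerate st.toList 0).filter (fun p => PySem.Chars.isdigit p.2)).map (·.2) := by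
    rw [← List.filter_reverse, List.reverse_reverse]
    have := PySem.List.map_snd_enumerate st.toList 0
    conv_lhs => rw [← this]
    rw [List.filter_map]
    rfl
  rw [← hfil]

-- ===== VERDICT (by name: the statement is the Claim_ definition above) =====
theorem trim_pref_spec : Claim_equal_trim_pref := by
  intro st _
  unfold Spec_trim_pref
  exact trim_pref_eq_alt st
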